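-- pv_equiv track=rewrite | github.com/MrBrantCode/unitest_baseline | mut_generate/mist_train_cf/cf_30122/solution.py | entance
-- ===== SOURCE A (Python) =====
-- def entance(line_segments, routingStrategy, edgeSpacing, conflictThreshold, createdJunctionPoints):
--     CONFLICT_PENALTY = 16
--     total_penalty = 0
--     for i in range(len(line_segments)):
--         for j in range(i+1, len(line_segments)):
--             seg1 = line_segments[i]
--             seg2 = line_segments[j]
--             if seg1[1] == seg2[1]:
--                 min_x = min(seg1[0], seg2[0])
--                 max_x = max(seg1[2], seg2[2])
--                 if max_x - min_x < conflictThreshold: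
--                     total_penalty += CONFLICT_PENALTY
--     return total_penalty
-- ===== SOURCE B (Python) =====
-- def entance(line_segments, routingStrategy, edgeSpacing, conflictThreshold, createdJunctionPoints):
--     # One pass: group segments by their y-value in a dict; each segment is only
--     # compared against earlier segments with the SAME y (the full inner scan and
--     # the y-equality test over all pairs disappear).
--     total = 0
--     seen = {}
--     for seg in line_segments:
--         a, y, c = seg[0], seg[1], seg[2]
--         bucket = seen.get(y)
--         if bucket is None:
--             bucket = []
--             seen[y] = bucket
--         for pa, pc in bucket:
--             if max(pc, c) - min(pa, a) < conflictThreshold: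
--                 total += 16
--         bucket.append((a, c))
--     return total
-- ===== Notes on version B (the rewrite author's own statement) =====
-- stated objective: alternative
-- what changed: Replaces the all-pairs double index loop with a single pass that groups segments by y-value in a dict, so each segment is compared only against the bucket of earlier segments with its own y instead of against every other segment.
-- outside the precondition, e.g. on entance([[1, 2]], 'x', 0, 5, []): A returns 0, B raises IndexError
import Mathlib
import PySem

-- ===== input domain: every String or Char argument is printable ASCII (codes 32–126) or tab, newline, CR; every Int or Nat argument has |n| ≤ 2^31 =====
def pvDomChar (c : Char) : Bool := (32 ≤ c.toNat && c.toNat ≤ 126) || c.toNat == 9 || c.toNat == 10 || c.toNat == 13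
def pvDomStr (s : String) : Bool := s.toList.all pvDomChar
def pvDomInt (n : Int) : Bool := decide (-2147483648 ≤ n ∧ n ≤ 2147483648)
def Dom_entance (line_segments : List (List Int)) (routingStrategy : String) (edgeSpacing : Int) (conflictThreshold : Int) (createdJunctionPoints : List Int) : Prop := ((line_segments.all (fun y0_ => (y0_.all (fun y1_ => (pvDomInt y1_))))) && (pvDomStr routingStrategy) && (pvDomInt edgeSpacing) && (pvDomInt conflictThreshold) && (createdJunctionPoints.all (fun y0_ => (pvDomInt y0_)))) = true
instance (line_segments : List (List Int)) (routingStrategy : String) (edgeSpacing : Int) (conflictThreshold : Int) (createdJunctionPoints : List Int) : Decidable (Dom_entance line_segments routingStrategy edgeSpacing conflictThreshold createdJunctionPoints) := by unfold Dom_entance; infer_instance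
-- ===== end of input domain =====

-- B groups segments by y in a dict built in one pass, so each segment is compared only
-- against earlier segments of its own y-group instead of every other segment.

-- ===== PORT A =====
def entance (line_segments : List (List Int)) (routingStrategy : String) (edgeSpacing : Int) (conflictThreshold : Int) (createdJunctionPoints : List Int) : Int :=
  -- CONFLICT_PENALTY = 16; nested index loops, exact transliteration
  (PySem.List.pyRange 0 (PySem.List.len line_segments) 1).foldl (fun total_penalty i =>
    (PySem.List.pyRange (i + 1) (PySem.List.len line_segments) 1).foldl (fun total_penalty j =>
      let seg1 := PySem.List.pyGetD line_segments i []
      let seg2 := PySem.List.pyGetD line_segments j []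
      if PySem.List.pyGetD seg1 1 0 = PySem.List.pyGetD seg2 1 0 then
        let min_x := min (PySem.List.pyGetD seg1 0 0) (PySem.List.pyGetD seg2 0 0)
        let max_x := max (PySem.List.pyGetD seg1 2 0) (PySem.List.pyGetD seg2 2 0)
        if max_x - min_x < conflictThreshold then total_penalty + 16 else total_penalty
      else total_penalty) total_penalty) 0

-- ===== PORT B =====
def entance_alt (line_segments : List (List Int)) (routingStrategy : String) (edgeSpacing : Int) (conflictThreshold : Int) (createdJunctionPoints : List Int) : Int :=
  -- one pass; state = (total, dict y ↦ bucket of (a, c) of earlier segments with that y)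
  (line_segments.foldl
    (fun (st : Int × PySem.Dict Int (List (Int × Int))) seg =>
      let a := PySem.List.pyGetD seg 0 0
      let y := PySem.List.pyGetD seg 1 0
      let c := PySem.List.pyGetD seg 2 0
      let bucket := st.2.getD y []
      let t := bucket.foldl (fun t p => if max p.2 c - min p.1 a < conflictThreshold then t + 16 else t) st.1
      (t, st.2.insert y (bucket ++ [(a, c)])))
    (0, PySem.Dict.empty)).1

-- ===== PRECONDITION & SPEC =====
-- Pre_ excludes inputs containing a segment of fewer than 3 entries: on those Python A
-- either raises IndexError itself or returns 0 only because no same-y pair ever touches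
-- the short segment, while B (which reads seg[0], seg[1], seg[2] of every segment) raises.
def Pre_entance (line_segments : List (List Int)) (routingStrategy : String) (edgeSpacing : Int) (conflictThreshold : Int) (createdJunctionPoints : List Int) : Prop :=
  ∀ s ∈ line_segments, 3 ≤ s.length
instance (line_segments : List (List Int)) (routingStrategy : String) (edgeSpacing : Int) (conflictThreshold : Int) (createdJunctionPoints : List Int) : Decidable (Pre_entance line_segments routingStrategy edgeSpacing conflictThreshold createdJunctionPoints) := by unfold Pre_entance; infer_instance
def pvWitness_entance : List (List Int) × String × Int × Int × List Int :=
  ([[0, 1, 4], [2, 1, 5], [0, 2, 9]], "orthogonal", 2, 6, [3])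
def Spec_entance (line_segments : List (List Int)) (routingStrategy : String) (edgeSpacing : Int) (conflictThreshold : Int) (createdJunctionPoints : List Int) (out : Int) : Prop := out = entance_alt line_segments routingStrategy edgeSpacing conflictThreshold createdJunctionPoints
instance (line_segments : List (List Int)) (routingStrategy : String) (edgeSpacing : Int) (conflictThreshold : Int) (createdJunctionPoints : List Int) (out : Int) : Decidable (Spec_entance line_segments routingStrategy edgeSpacing conflictThreshold createdJunctionPoints out) := by unfold Spec_entance; infer_instance

-- ===== CLAIM (what is proved, stated in full; the proofs are below) =====
def Claim_equal_entance : Prop := ∀ (line_segments : List (List Int)) (routingStrategy : String) (edgeSpacing : Int) (conflictThreshold : Int) (createdJunctionPoints : List Int), Dom_entance line_segments routingStrategy edgeSpacing conflictThreshold createdJunctionPoints → Pre_entance line_segments routingStrategy edgeSpacing conflictThreshold createdJunctionPoints → Spec_entance line_segments routingStrategy edgeSpacing conflictThreshold createdJunctionPoints (entance line_segments routingStrategy edgeSpacing conflictThreshold createdJunctionPoints)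

-- ===== LEMMAS AND PROOFS =====

-- the penalty of one ordered pair (s earlier, u later)
def pairPen (T : Int) (s u : List Int) : Int :=
  if s.getD 1 0 = u.getD 1 0 then
    (if max (s.getD 2 0) (u.getD 2 0) - min (s.getD 0 0) (u.getD 0 0) < T then 16 else 0)
  else 0

-- total penalty over all ordered pairs i < j
def brute (T : Int) : List (List Int) → Int
  | [] => 0
  | s :: rest => (rest.map (pairPen T s)).sum + brute T rest

def proj (s : List Int) : Int × Int := (s.getD 0 0, s.getD 2 0)
def yv (s : List Int) : Int := s.getD 1 0

-- penalty of one new segment (projected to q = (a, c)) against a bucket of earlier same-y projections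
def bucketPen (T : Int) (q : Int × Int) (bucket : List (Int × Int)) : Int :=
  (bucket.map (fun p => if max p.2 q.2 - min p.1 q.1 < T then 16 else 0)).sum

-- penalty of every segment of ls against the pre-existing buckets of d
def interact (T : Int) (d : PySem.Dict Int (List (Int × Int))) (ls : List (List Int)) : Int :=
  (ls.map (fun u => bucketPen T (proj u) (d.getD (yv u) []))).sum


-- the bucket loop of B adds bucketPen of the new projection against the bucket
lemma bucket_fold (T a c : Int) (bucket : List (Int × Int)) (t0 : Int) :
    bucket.foldl (fun t p => if max p.2 c - min p.1 a < T then t + 16 else t) t0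
      = t0 + bucketPen T (a, c) bucket := by
  rw [PySem.List.foldl_congr_mem bucket _
        (fun t p => t + (if max p.2 c - min p.1 a < T then 16 else 0)) t0
        (by intro acc x _; by_cases h1 : max x.2 c - min x.1 a < T <;> simp [h1])]
  rw [PySem.List.foldl_add]
  rfl

-- inserting segment s into its bucket adds pairPen T s u for every later u
lemma interact_insert (T : Int) (d : PySem.Dict Int (List (Int × Int))) (s : List Int)
    (rest : List (List Int)) :
    interact T (d.insert (yv s) (d.getD (yv s) [] ++ [proj s])) rest
      = interact T d rest + (rest.map (pairPen T s)).sum := by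
  unfold interact
  rw [List.map_congr_left (g := fun u => bucketPen T (proj u) (d.getD (yv u) []) + pairPen T s u)
        (by
          intro u _
          by_cases h : yv u = yv s
          · rw [h, PySem.Dict.getD_insert_self]
            have hy : s.getD 1 0 = u.getD 1 0 := by simpa [yv] using h.symm
            simp only [bucketPen, pairPen, proj, List.map_append, List.sum_append,
              List.map_cons, List.map_nil, List.sum_cons, List.sum_nil, if_pos hy, add_zero, h]
            rfl
          · rw [PySem.Dict.getD_insert_of_ne _ _ _ h]
            have hy : ¬ s.getD 1 0 = u.getD 1 0 := fun hc => h (by simpa [yv] using hc.symm)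
            simp only [pairPen, if_neg hy, add_zero])]
  rw [PySem.List.sum_map_add_int]

-- characterisation of B's single pass
lemma B_loop (T : Int) (ls : List (List Int)) :
    ∀ (t : Int) (d : PySem.Dict Int (List (Int × Int))),
      (ls.foldl
        (fun (st : Int × PySem.Dict Int (List (Int × Int))) seg =>
          let a := PySem.List.pyGetD seg 0 0
          let y := PySem.List.pyGetD seg 1 0
          let c := PySem.List.pyGetD seg 2 0
          let bucket := st.2.getD y []
          let t := bucket.foldl (fun t p => if max p.2 c - min p.1 a < T then t + 16 else t) st.1
          (t, st.2.insert y (bucket ++ [(a, c)]))) (t, d)).1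
      = t + interact T d ls + brute T ls := by
  induction ls with
  | nil => intro t d; simp [interact, brute]
  | cons s rest ih =>
    intro t d
    rw [List.foldl_cons]
    have hstep : (let a := PySem.List.pyGetD s 0 0
          let y := PySem.List.pyGetD s 1 0
          let c := PySem.List.pyGetD s 2 0
          let bucket := (t, d).2.getD y []
          let t' := bucket.foldl (fun t p => if max p.2 c - min p.1 a < T then t + 16 else t) (t, d).1
          (t', (t, d).2.insert y (bucket ++ [(a, c)])))
        = (t + bucketPen T (proj s) (d.getD (yv s) []),
           d.insert (yv s) (d.getD (yv s) [] ++ [proj s])) := by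
      simp only [PySem.List.pyGetD_ofNat']
      rw [bucket_fold]
      rfl
    rw [hstep, ih, interact_insert]
    simp only [interact, brute, List.map_cons, List.sum_cons]
    ring

-- B computes the all-pairs penalty sum
lemma B_eq (line_segments : List (List Int)) (routingStrategy : String) (edgeSpacing : Int)
    (conflictThreshold : Int) (createdJunctionPoints : List Int) :
    entance_alt line_segments routingStrategy edgeSpacing conflictThreshold createdJunctionPoints
      = brute conflictThreshold line_segments := by
  unfold entance_alt
  rw [B_loop]
  simp [interact, bucketPen, PySem.Dict.getD_empty]

-- the inner j-loop of A, after indexing is removed, sums pairPen against the fixed seg1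
lemma pair_step (T : Int) (s : List Int) (rest : List (List Int)) (acc : Int) :
    rest.foldl (fun total u =>
        if PySem.List.pyGetD s 1 0 = PySem.List.pyGetD u 1 0 then
          (if max (PySem.List.pyGetD s 2 0) (PySem.List.pyGetD u 2 0)
               - min (PySem.List.pyGetD s 0 0) (PySem.List.pyGetD u 0 0) < T
           then total + 16 else total)
        else total) acc
      = acc + (rest.map (pairPen T s)).sum := by
  rw [PySem.List.foldl_congr_mem rest _ (fun total u => total + pairPen T s u) acc
        (by
          intro acc u _
          simp only [pairPen, PySem.List.pyGetD_ofNat']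
          split_ifs with h1 h2 <;> simp_all)]
  rw [PySem.List.foldl_add]

-- characterisation of A's nested index loops, from position k on
lemma A_loop (T : Int) (ls : List (List Int)) :
    ∀ (n k : Nat) (acc : Int), ls.length ≤ k + n →
      ((PySem.List.pyRange (k : Int) (PySem.List.len ls) 1).foldl (fun total_penalty i =>
        (PySem.List.pyRange (i + 1) (PySem.List.len ls) 1).foldl (fun total_penalty j =>
          let seg1 := PySem.List.pyGetD ls i []
          let seg2 := PySem.List.pyGetD ls j []
          if PySem.List.pyGetD seg1 1 0 = PySem.List.pyGetD seg2 1 0 then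
            let min_x := min (PySem.List.pyGetD seg1 0 0) (PySem.List.pyGetD seg2 0 0)
            let max_x := max (PySem.List.pyGetD seg1 2 0) (PySem.List.pyGetD seg2 2 0)
            if max_x - min_x < T then total_penalty + 16 else total_penalty
          else total_penalty) total_penalty) acc)
      = acc + brute T (ls.drop k) := by
  intro n
  induction n with
  | zero =>
    intro k acc h
    rw [PySem.List.len_eq, PySem.List.pyRange_one_eq_nil (by exact_mod_cast h)]
    rw [List.drop_eq_nil_of_le (show ls.length <= k by omega)]
    simp [brute]
  | succ n ih =>
    intro k acc h
    by_cases hk : ls.length ≤ k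
    · rw [PySem.List.len_eq, PySem.List.pyRange_one_eq_nil (by exact_mod_cast hk)]
      rw [List.drop_eq_nil_of_le hk]
      simp [brute]
    · rw [not_le] at hk
      rw [PySem.List.len_eq, PySem.List.pyRange_one_cons (by exact_mod_cast hk), List.foldl_cons]
      have hcast : ((k : Int) + 1) = ((k + 1 : Nat) : Int) := by push_cast; ring
      have hinner :
          (PySem.List.pyRange ((k : Int) + 1) ((ls.length : Nat) : Int) 1).foldl
            (fun total_penalty j =>
              let seg1 := PySem.List.pyGetD ls (k : Int) []
              let seg2 := PySem.List.pyGetD ls j []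
              if PySem.List.pyGetD seg1 1 0 = PySem.List.pyGetD seg2 1 0 then
                let min_x := min (PySem.List.pyGetD seg1 0 0) (PySem.List.pyGetD seg2 0 0)
                let max_x := max (PySem.List.pyGetD seg1 2 0) (PySem.List.pyGetD seg2 2 0)
                if max_x - min_x < T then total_penalty + 16 else total_penalty
              else total_penalty) acc
          = acc + ((ls.drop (k + 1)).map (pairPen T (PySem.List.pyGetD ls (k : Int) []))).sum := by
        rw [PySem.List.foldl_pyRange_pyGetD' ls []
              (f := fun total_penalty seg2 =>
                if PySem.List.pyGetD (PySem.List.pyGetD ls (k : Int) []) 1 0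
                     = PySem.List.pyGetD seg2 1 0 then
                  (if max (PySem.List.pyGetD (PySem.List.pyGetD ls (k : Int) []) 2 0)
                          (PySem.List.pyGetD seg2 2 0)
                        - min (PySem.List.pyGetD (PySem.List.pyGetD ls (k : Int) []) 0 0)
                          (PySem.List.pyGetD seg2 0 0) < T
                   then total_penalty + 16 else total_penalty)
                else total_penalty)
              acc (by positivity)]
        have : ((k : Int) + 1).toNat = k + 1 := by omega
        rw [this, pair_step]
      rw [hinner]
      rw [hcast, ← PySem.List.len_eq, ih (k + 1) _ (by omega)]
      have hdrop : ls.drop k = ls[k] :: ls.drop (k + 1) := List.drop_eq_getElem_cons hk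
      have hget : PySem.List.pyGetD ls (k : Int) [] = ls[k] := by
        simp [PySem.List.pyGetD_natCast, List.getElem?_eq_getElem hk]
      rw [hdrop, hget]
      simp only [brute]
      ring

-- A computes the all-pairs penalty sum
lemma A_eq (line_segments : List (List Int)) (routingStrategy : String) (edgeSpacing : Int)
    (conflictThreshold : Int) (createdJunctionPoints : List Int) :
    entance line_segments routingStrategy edgeSpacing conflictThreshold createdJunctionPoints
      = brute conflictThreshold line_segments := by
  unfold entance
  have h := A_loop conflictThreshold line_segments line_segments.length 0 0 (by omega)
  simpa using h

-- ===== VERDICT (by name: the statement is the Claim_ definition above) =====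
theorem entance_spec : Claim_equal_entance := by
  intro line_segments routingStrategy edgeSpacing conflictThreshold createdJunctionPoints _ _
  unfold Spec_entance
  rw [A_eq, B_eq]
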